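-- pv_equiv track=rewrite | github.com/wyf162/pythonProject | leetcode/dynamic-programming/state-compress/1655_can_distribute.py | canDistribute
-- ===== SOURCE A (Python) =====
-- import collections
-- from typing import List
--
-- def canDistribute(nums: List[int], quantity: List[int]) -> bool:
--     cache = collections.Counter(nums)
--     cnt = []
--     for k, v in cache.items():
--         cnt.append(v)
--
--     n, m = len(cnt), len(quantity)
--     ssum = [0 for _ in range(1 << m)]
--     for i in range(1, (1 << m)):
--         for j in range(m):  # 遍历状态的每一位
--             if (i & (1 << j)) != 0:
--                 left = i - (1 << j)
--                 ssum[i] = ssum[left] + quantity[j]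
--                 break
--
--     dp = [[False for _ in range(1 << m)] for _ in range(n)]
--     for i in range(n):
--         dp[i][0] = True
--     for i in range(n):
--         for j in range(1 << m):
--             if i > 0 and dp[i - 1][j]:
--                 dp[i][j] = True
--                 continue
--             s = j
--             while s:
--                 prev = j - s  # 前 i-1 个元素需要满足子集 prev = j-s
--                 last = (prev == 0) if i == 0 else dp[i - 1][prev]  # cnt[0..i-1] 能否满足子集 prev
--                 need = ssum[s] <= cnt[i]  # cnt[i] 能否满足子集 s 构造s集合的元素均相同
--                 if last and need:
--                     dp[i][j] = True
--                     break
--                 s = (s - 1) & j  # 枚举二进制子集 O(3^m)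
--     return dp[n - 1][(1 << m) - 1]
-- ===== SOURCE B (Python) =====
-- import collections
--
-- def canDistribute(nums, quantity):
--     cnt = list(collections.Counter(nums).values())
--     m = len(quantity)
--     full = (1 << m) - 1
--     ssum = [sum(quantity[j] for j in range(m) if (mask >> j) & 1) for mask in range(1 << m)]
--     memo = {}
--
--     def dfs(i, mask):
--         # can the first i distinct values (counts cnt[0..i-1]) serve the orders in `mask`?
--         if mask == 0:
--             return True
--         if i == 0:
--             return False
--         if (i, mask) in memo:
--             return memo[(i, mask)]
--         res = dfs(i - 1, mask)
--         if not res: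
--             s = mask
--             while s:
--                 if ssum[s] <= cnt[i - 1] and dfs(i - 1, mask - s):
--                     res = True
--                     break
--                 s = (s - 1) & mask
--         memo[(i, mask)] = res
--         return res
--
--     return dfs(len(cnt), full)
-- ===== Notes on version B (the rewrite author's own statement) =====
-- stated objective: alternative
-- what changed: Replaces the bottom-up n x 2^m boolean table (and its incremental lowest-bit ssum construction) by a top-down memoized recursion dfs(i, mask) over a dict cache, with subset sums computed in closed form per mask; B returns on empty nums where A raises.
-- crash fix: On empty nums A raises IndexError (dp[-1] on an empty table) for every quantity; B returns True when quantity is empty and False otherwise. — e.g. on canDistribute([], []): A raises IndexError, B returns true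
import Mathlib
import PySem

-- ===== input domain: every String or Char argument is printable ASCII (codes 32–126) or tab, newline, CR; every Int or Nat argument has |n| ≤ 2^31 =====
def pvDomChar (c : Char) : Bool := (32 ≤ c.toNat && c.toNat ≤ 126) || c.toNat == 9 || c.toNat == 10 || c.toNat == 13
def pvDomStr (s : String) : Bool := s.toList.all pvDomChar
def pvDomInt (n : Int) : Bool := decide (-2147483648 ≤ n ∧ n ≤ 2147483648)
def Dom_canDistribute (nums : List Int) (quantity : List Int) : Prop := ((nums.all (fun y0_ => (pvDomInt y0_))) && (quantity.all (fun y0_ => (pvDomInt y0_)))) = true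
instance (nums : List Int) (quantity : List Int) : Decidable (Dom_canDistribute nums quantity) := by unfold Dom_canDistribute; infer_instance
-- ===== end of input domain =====

-- B replaces A's bottom-up n×2^m boolean table (and its incremental lowest-bit subset-sum
-- construction) by a top-down memoized recursion dfs(i, mask) over a dict cache, with subset sums
-- computed in closed form per mask (objective: alternative; same asymptotics). On empty nums A
-- raises IndexError; that input is excluded by Pre_ and documented in Raises_. All loop indices in
-- both Pythons are nonnegative and in range, so `range(a,b)` loops are ported as Nat ranges.

-- ===== PORT A =====
-- A's `s = j; while s: ...; s = (s - 1) & j` submask loop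
def subsetChain (lastAt : Nat → Bool) (ssum : List Int) (c : Int) (j : Nat) (s : Nat) : Bool :=
  if h : s = 0 then false
  else if lastAt (j - s) && decide (ssum.getD s 0 ≤ c) then true
  else subsetChain lastAt ssum c j ((s - 1) &&& j)
termination_by s
decreasing_by exact Nat.lt_of_le_of_lt (Nat.and_le_left) (Nat.sub_lt (Nat.pos_of_ne_zero h) Nat.one_pos)

-- A's inner `for j in range(m): if (i & (1 << j)) != 0: ...; break`
def ssumScanA (quantity : List Int) (i : Nat) (arr : List Int) : List Nat → List Int
  | [] => arr
  | j :: rest =>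
    if i &&& (1 <<< j) ≠ 0 then
      arr.set i (arr.getD (i - (1 <<< j)) 0 + quantity.getD j 0)
    else ssumScanA quantity i arr rest

def canDistribute (nums : List Int) (quantity : List Int) : Bool :=
  let cache := PySem.Dict.counter nums
  let cnt : List Int := cache.items.foldl (fun acc kv => acc ++ [kv.2]) []
  let n := cnt.length
  let m := quantity.length
  let ssum := (List.range' 1 (1 <<< m - 1)).foldl
      (fun arr i => ssumScanA quantity i arr (List.range m)) (List.replicate (1 <<< m) 0)
  let dp := List.replicate n (List.replicate (1 <<< m) false)
  let dp := (List.range n).foldl (fun dp i => dp.set i ((dp.getD i []).set 0 true)) dp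
  let dp := (List.range n).foldl (fun dp i =>
    (List.range (1 <<< m)).foldl (fun dp j =>
      if decide (0 < i) && (dp.getD (i - 1) []).getD j false then
        dp.set i ((dp.getD i []).set j true)
      else if subsetChain (fun p => if i = 0 then decide (p = 0) else (dp.getD (i - 1) []).getD p false)
                ssum (cnt.getD i 0) j j then
        dp.set i ((dp.getD i []).set j true)
      else dp) dp) dp
  (dp.getD (n - 1) []).getD (1 <<< m - 1) false

-- ===== PORT B =====
-- B's per-mask closed-form subset sum: sum(quantity[j] for j in range(m) if (mask >> j) & 1)
def ssumOf (quantity : List Int) (mask : Nat) : Int :=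
  (List.range quantity.length).foldl
    (fun acc j => if (mask >>> j) &&& 1 ≠ 0 then acc + quantity.getD j 0 else acc) 0

-- B's `dfs(i, mask)` with its memo dict threaded through, and its inner
-- `s = mask; while s: ...; s = (s - 1) & mask` loop (`loopAltB`, returning the final `res`)
mutual
def dfsAltB (ssum cnt : List Int) (i mask : Nat) (memo : PySem.Dict (Nat × Nat) Bool) :
    Bool × PySem.Dict (Nat × Nat) Bool :=
  if mask = 0 then (true, memo)
  else if hi : i = 0 then (false, memo)
  else match memo.get? (i, mask) with
    | some v => (v, memo)
    | none =>
      let p := dfsAltB ssum cnt (i - 1) mask memo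
      let q := if p.1 then p else loopAltB ssum cnt i mask mask p.2
      (q.1, q.2.insert (i, mask) q.1)
termination_by (i, 0, 0)
decreasing_by
  · exact Prod.Lex.left _ _ (Nat.sub_lt (Nat.pos_of_ne_zero hi) Nat.one_pos)
  · exact Prod.Lex.left _ _ (Nat.sub_lt (Nat.pos_of_ne_zero hi) Nat.one_pos)

def loopAltB (ssum cnt : List Int) (i mask s : Nat) (memo : PySem.Dict (Nat × Nat) Bool) :
    Bool × PySem.Dict (Nat × Nat) Bool :=
  if hs : s = 0 then (false, memo)
  else if decide (ssum.getD s 0 ≤ cnt.getD (i - 1) 0) then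
    let p := dfsAltB ssum cnt (i - 1) (mask - s) memo
    if p.1 then (true, p.2)
    else loopAltB ssum cnt i mask ((s - 1) &&& mask) p.2
  else loopAltB ssum cnt i mask ((s - 1) &&& mask) memo
termination_by (i - 1, 1, s)
decreasing_by
  · exact Prod.Lex.right _ (Prod.Lex.left _ _ Nat.one_pos)
  · exact Prod.Lex.right _ (Prod.Lex.right _ (Nat.lt_of_le_of_lt (Nat.and_le_left) (Nat.sub_lt (Nat.pos_of_ne_zero hs) Nat.one_pos)))
  · exact Prod.Lex.right _ (Prod.Lex.right _ (Nat.lt_of_le_of_lt (Nat.and_le_left) (Nat.sub_lt (Nat.pos_of_ne_zero hs) Nat.one_pos)))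
end

def canDistribute_alt (nums : List Int) (quantity : List Int) : Bool :=
  let cnt := (PySem.Dict.counter nums).values
  let m := quantity.length
  let full := (1 <<< m) - 1
  let ssum := (List.range (1 <<< m)).map (ssumOf quantity)
  (dfsAltB ssum cnt cnt.length full PySem.Dict.empty).1

-- ===== PRECONDITION & SPEC =====
-- Pre_ excludes exactly empty nums, where A raises IndexError (dp[n-1] = dp[-1] on an empty dp table).
def Pre_canDistribute (nums : List Int) (quantity : List Int) : Prop := nums ≠ []
instance (nums : List Int) (quantity : List Int) : Decidable (Pre_canDistribute nums quantity) := by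
  unfold Pre_canDistribute; infer_instance

def pvWitness_canDistribute : List Int × List Int := ([1, 1, 2], [2, 1])

-- On empty nums A raises IndexError for every quantity; B returns True iff quantity is empty.
def Raises_canDistribute (nums : List Int) (quantity : List Int) : Prop := nums = []
instance (nums : List Int) (quantity : List Int) : Decidable (Raises_canDistribute nums quantity) := by
  unfold Raises_canDistribute; infer_instance
def pvRaiseWitness_canDistribute : List Int × List Int := ([], [])
def pvRaiseWitnessOut_canDistribute : Bool := true

def Spec_canDistribute (nums : List Int) (quantity : List Int) (out : Bool) : Prop :=
  out = canDistribute_alt nums quantity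
instance (nums : List Int) (quantity : List Int) (out : Bool) : Decidable (Spec_canDistribute nums quantity out) := by
  unfold Spec_canDistribute; infer_instance

-- ===== CLAIM (what is proved, stated in full; the proofs are below) =====
def Claim_equal_canDistribute : Prop := ∀ (nums : List Int) (quantity : List Int),
  Dom_canDistribute nums quantity → Pre_canDistribute nums quantity →
  Spec_canDistribute nums quantity (canDistribute nums quantity)

def Claim_raises_canDistribute : Prop :=
  (∀ (nums : List Int) (quantity : List Int), Dom_canDistribute nums quantity →
    Raises_canDistribute nums quantity → ¬ Pre_canDistribute nums quantity) ∧
  (Dom_canDistribute (pvRaiseWitness_canDistribute.1) (pvRaiseWitness_canDistribute.2) ∧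
   Raises_canDistribute (pvRaiseWitness_canDistribute.1) (pvRaiseWitness_canDistribute.2) ∧
   canDistribute_alt (pvRaiseWitness_canDistribute.1) (pvRaiseWitness_canDistribute.2) = pvRaiseWitnessOut_canDistribute)

-- ===== LEMMAS AND PROOFS =====

theorem getD_set_eq {α : Type} (l : List α) (i t : Nat) (x d : α) :
    (l.set i x).getD t d = if t = i ∧ i < l.length then x else l.getD t d := by
  simp only [List.getD, List.getElem?_set]
  split_ifs with h1 h2 h3 <;> simp_all

theorem foldl_if_add (P : Nat → Prop) [DecidablePred P] (v : Nat → Int) :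
    ∀ (l : List Nat) (acc : Int),
      l.foldl (fun a j => if P j then a + v j else a) acc
        = acc + (l.map (fun j => if P j then v j else 0)).sum := by
  intro l
  induction l with
  | nil => simp
  | cons x xs ih => intro acc; by_cases h : P x <;> simp [h, ih, add_assoc]

theorem chain_congr (f g : Nat → Bool) (ssum : List Int) (c : Int) (j : Nat)
    (h : ∀ p, p ≤ j → f p = g p) :
    ∀ s, subsetChain f ssum c j s = subsetChain g ssum c j s := by
  intro s
  induction s using Nat.strong_induction_on with
  | _ s ih =>
    conv_lhs => rw [subsetChain]
    conv_rhs => rw [subsetChain]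
    by_cases hs : s = 0
    · simp [hs]
    · simp only [hs, dite_false]
      rw [h (j - s) (Nat.sub_le _ _),
        ih ((s - 1) &&& j) (Nat.lt_of_le_of_lt Nat.and_le_left (Nat.sub_lt (Nat.pos_of_ne_zero hs) Nat.one_pos))]

theorem bit_cond (i j : Nat) : ((i >>> j) &&& 1 ≠ 0) ↔ i.testBit j = true := by
  rw [Nat.and_one_is_mod, Nat.shiftRight_eq_div_pow, Nat.testBit_eq_decide_div_mod_eq]
  simp

theorem ssumOf_eq_sum (q : List Int) (i : Nat) :
    ssumOf q i = ((List.range q.length).map (fun j => if i.testBit j then q.getD j 0 else 0)).sum := by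
  rw [ssumOf, foldl_if_add (fun j => (i >>> j) &&& 1 ≠ 0) (fun j => q.getD j 0), zero_add]
  congr 1
  apply List.map_congr_left
  intro j _
  by_cases h : i.testBit j
  · rw [if_pos ((bit_cond i j).2 h), if_pos h]
  · rw [if_neg (fun hc => h ((bit_cond i j).1 hc)), if_neg h]

theorem ssumOf_zero (q : List Int) : ssumOf q 0 = 0 := by
  simp [ssumOf_eq_sum]

theorem mod_pow_eq_zero (i j : Nat) (hlow : ∀ t, t < j → i.testBit t = false) :
    i % 2 ^ j = 0 := by
  apply Nat.eq_of_testBit_eq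
  intro k
  rw [Nat.testBit_mod_two_pow]
  by_cases hk : k < j
  · simp [hk, hlow k hk]
  · simp [hk]

theorem lowbit_decomp (i j : Nat) (hj : i.testBit j = true)
    (hlow : ∀ t, t < j → i.testBit t = false) :
    i = 2 ^ (j + 1) * (i / 2 ^ (j + 1)) + 2 ^ j := by
  have hmod : i % 2 ^ (j + 1) = 2 ^ j := by
    rw [Nat.mod_pow_succ, mod_pow_eq_zero i j hlow]
    rw [Nat.testBit_eq_decide_div_mod_eq] at hj
    simp at hj
    simp [hj]
  conv_lhs => rw [← Nat.div_add_mod i (2 ^ (j + 1))]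
  rw [hmod]

theorem testBit_sub_lowbit (i j : Nat) (hj : i.testBit j = true)
    (hlow : ∀ t, t < j → i.testBit t = false) (k : Nat) :
    (i - 2 ^ j).testBit k = if k = j then false else i.testBit k := by
  have hd := lowbit_decomp i j hj hlow
  set D := i / 2 ^ (j + 1) with hD
  have hsub : i - 2 ^ j = 2 ^ (j + 1) * D := by rw [hd, Nat.add_sub_cancel]
  rcases lt_trichotomy k j with hk | hk | hk
  · rw [if_neg (by omega), hlow k hk, Nat.testBit_eq_decide_div_mod_eq, hsub]
    have h1 : 2 ^ (j + 1) * D = 2 ^ k * (2 ^ (j + 1 - k) * D) := by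
      rw [← mul_assoc, ← pow_add]
      congr 2
      omega
    rw [h1, Nat.mul_div_cancel_left _ (by positivity)]
    have h2 : 2 ^ (j + 1 - k) * D = 2 * (2 ^ (j - k) * D) := by
      rw [show j + 1 - k = (j - k) + 1 from by omega, pow_succ]
      ring
    rw [h2]
    simp [Nat.mul_mod_right]
  · rw [if_pos hk, hk, Nat.testBit_eq_decide_div_mod_eq, hsub]
    have h1 : 2 ^ (j + 1) * D = 2 ^ j * (2 * D) := by
      rw [pow_succ]
      ring
    rw [h1, Nat.mul_div_cancel_left _ (by positivity)]
    simp [Nat.mul_mod_right]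
  · rw [if_neg (by omega), Nat.testBit_eq_decide_div_mod_eq, Nat.testBit_eq_decide_div_mod_eq]
    have e : k = (j + 1) + (k - j - 1) := by omega
    have hden : (2:Nat) ^ k = 2 ^ (j + 1) * 2 ^ (k - j - 1) := by
      rw [← pow_add]
      congr 1
    have h1 : i / 2 ^ k = D / 2 ^ (k - j - 1) := by
      rw [hden, ← Nat.div_div_eq_div_mul]
    have h2 : (i - 2 ^ j) / 2 ^ k = D / 2 ^ (k - j - 1) := by
      rw [hsub, hden, ← Nat.div_div_eq_div_mul, Nat.mul_div_cancel_left _ (by positivity)]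
    rw [h1, h2]

theorem ssumOf_rec (q : List Int) (i j : Nat) (hj : i.testBit j = true)
    (hlow : ∀ t, t < j → i.testBit t = false) (hjm : j < q.length) :
    ssumOf q i = ssumOf q (i - 2 ^ j) + q.getD j 0 := by
  rw [ssumOf_eq_sum, ssumOf_eq_sum]
  have hsplit : List.range q.length
      = List.range' 0 j ++ j :: List.range' (j + 1) (q.length - j - 1) := by
    rw [List.range_eq_range']
    rw [show q.length = j + (q.length - j) from by omega, ← List.range'_append_1]
    congr 1
    rw [show q.length - j = (q.length - j - 1) + 1 from by omega]
    rw [List.range'_succ]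
    simp only [Nat.zero_add]
    congr 2
    omega
  rw [hsplit]
  simp only [List.map_append, List.sum_append, List.map_cons, List.sum_cons]
  have hpart1 : ∀ f g : Nat → Int, (∀ t, t < j → f t = g t) →
      (List.map f (List.range' 0 j)).sum = (List.map g (List.range' 0 j)).sum := by
    intro f g h
    congr 1
    apply List.map_congr_left
    intro t ht
    have := List.mem_range'_1.1 ht
    exact h t (by omega)
  have e1 : (List.map (fun t => if (i - 2 ^ j).testBit t then q.getD t 0 else 0) (List.range' 0 j)).sum
      = (List.map (fun t => if i.testBit t then q.getD t 0 else 0) (List.range' 0 j)).sum := by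
    apply hpart1
    intro t ht
    rw [testBit_sub_lowbit i j hj hlow t, if_neg (show ¬ t = j from by omega)]
  have e3 : (List.map (fun t => if (i - 2 ^ j).testBit t then q.getD t 0 else 0)
        (List.range' (j + 1) (q.length - j - 1))).sum
      = (List.map (fun t => if i.testBit t then q.getD t 0 else 0)
        (List.range' (j + 1) (q.length - j - 1))).sum := by
    congr 1
    apply List.map_congr_left
    intro t ht
    have := List.mem_range'_1.1 ht
    rw [testBit_sub_lowbit i j hj hlow t, if_neg (show ¬ t = j from by omega)]
  rw [e1, e3, hj, testBit_sub_lowbit i j hj hlow j, if_pos rfl]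
  simp
  ring

theorem bit_condA (i j : Nat) : (i &&& (1 <<< j) ≠ 0) ↔ i.testBit j = true := by
  rw [Nat.one_shiftLeft, Nat.and_two_pow]
  by_cases h : i.testBit j <;> simp [h]

theorem scanA_spec (q : List Int) (i : Nat) :
    ∀ (k a : Nat), 0 < i → (∀ t, t < a → i.testBit t = false) → i < 2 ^ (a + k) →
      ∃ j, a ≤ j ∧ j < a + k ∧ i.testBit j = true ∧ (∀ t, t < j → i.testBit t = false) ∧
        ∀ arr : List Int, ssumScanA q i arr (List.range' a k)
          = arr.set i (arr.getD (i - 2 ^ j) 0 + q.getD j 0) := by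
  intro k
  induction k with
  | zero =>
    intro a hi hlow hub
    exfalso
    have : i % 2 ^ a = 0 := mod_pow_eq_zero i a hlow
    have : i % 2 ^ a = i := Nat.mod_eq_of_lt (by simpa using hub)
    omega
  | succ k ih =>
    intro a hi hlow hub
    by_cases hb : i.testBit a
    · refine ⟨a, le_refl a, by omega, hb, hlow, ?_⟩
      intro arr
      rw [List.range'_succ, ssumScanA, if_pos (by rw [bit_condA]; exact hb), Nat.one_shiftLeft]
    · have hlow' : ∀ t, t < a + 1 → i.testBit t = false := by
        intro t ht
        rcases Nat.lt_or_ge t a with h | h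
        · exact hlow t h
        · have : t = a := by omega
          simp [this, hb]
      obtain ⟨j, h1, h2, h3, h4, h5⟩ := ih (a + 1) hi hlow' (by
        rw [show a + 1 + k = a + (k + 1) from by omega]; exact hub)
      refine ⟨j, by omega, by omega, h3, h4, ?_⟩
      intro arr
      rw [List.range'_succ, ssumScanA, if_neg (by rw [bit_condA]; simp [hb]), h5 arr]

theorem ssumA_aux (q : List Int) :
    ∀ k, k ≤ 2 ^ q.length - 1 →
      ((List.range' 1 k).foldl (fun arr i => ssumScanA q i arr (List.range q.length))
          (List.replicate (2 ^ q.length) 0)).length = 2 ^ q.length ∧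
      ∀ t, t ≤ k →
        ((List.range' 1 k).foldl (fun arr i => ssumScanA q i arr (List.range q.length))
          (List.replicate (2 ^ q.length) 0)).getD t 0 = ssumOf q t := by
  intro k
  induction k with
  | zero =>
    intro _
    refine ⟨by simp, ?_⟩
    intro t ht
    interval_cases t
    rw [show List.range' 1 0 = [] from rfl, List.foldl_nil, ssumOf_zero, List.getD]
    cases h : (List.replicate (2 ^ q.length) (0:Int))[0]? with
    | none => rfl
    | some v => simpa using List.eq_of_mem_replicate (List.mem_of_getElem? h)
  | succ k ih =>
    intro hk
    obtain ⟨ihlen, ihval⟩ := ih (by omega)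
    rw [List.range'_concat]
    simp only [List.foldl_append, List.foldl_cons, List.foldl_nil]
    set arr := (List.range' 1 k).foldl (fun arr i => ssumScanA q i arr (List.range q.length))
      (List.replicate (2 ^ q.length) 0) with harr
    have hi1 : 0 < 1 + 1 * k := by omega
    have hi2 : 1 + 1 * k < 2 ^ q.length := by
      have : 0 < 2 ^ q.length := by positivity
      omega
    obtain ⟨j, _, hjm, hbit, hlow, hscan⟩ :=
      scanA_spec q (1 + 1 * k) q.length 0 hi1 (fun t ht => absurd ht (Nat.not_lt_zero t))
        (by simpa using hi2)
    have hscan' : ssumScanA q (1 + 1 * k) arr (List.range q.length)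
        = arr.set (1 + 1 * k) (arr.getD (1 + 1 * k - 2 ^ j) 0 + q.getD j 0) := by
      rw [List.range_eq_range']
      exact hscan arr
    rw [hscan']
    have hsub_le : 1 + 1 * k - 2 ^ j ≤ k := by
      have : 0 < 2 ^ j := by positivity
      omega
    constructor
    · rw [List.length_set, ihlen]
    · intro t ht
      rw [getD_set_eq]
      by_cases hti : t = 1 + 1 * k
      · rw [if_pos ⟨hti, by omega⟩, ihval _ hsub_le, hti,
          ← ssumOf_rec q (1 + 1 * k) j hbit hlow (by simpa using hjm)]
      · rw [if_neg (by tauto), ihval t (by omega)]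

theorem ssumA_eq (q : List Int) :
    (List.range' 1 (1 <<< q.length - 1)).foldl
        (fun arr i => ssumScanA q i arr (List.range q.length))
        (List.replicate (1 <<< q.length) 0)
      = (List.range (1 <<< q.length)).map (ssumOf q) := by
  rw [Nat.one_shiftLeft]
  obtain ⟨hlen, hval⟩ := ssumA_aux q (2 ^ q.length - 1) (le_refl _)
  apply List.ext_getElem
  · rw [hlen]
    simp
  · intro t h1 h2
    have ht : t < 2 ^ q.length := by rw [hlen] at h1; exact h1
    rw [← List.getD_eq_getElem _ 0 h1, hval t (by omega)]
    rw [List.getElem_map, List.getElem_range]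

-- the abstract recurrence both programs compute
def stepF (ssum : List Int) (f : Nat → Bool) (c : Int) : Nat → Bool :=
  fun j => f j || subsetChain f ssum c j j

def FRow (ssum : List Int) (cs : List Int) : Nat → Bool :=
  cs.foldl (stepF ssum) (fun j => decide (j = 0))

theorem FRow_zero_aux (ssum : List Int) :
    ∀ (cs : List Int) (f : Nat → Bool), f 0 = true → cs.foldl (stepF ssum) f 0 = true := by
  intro cs
  induction cs with
  | nil => intro f hf; exact hf
  | cons c cs ih =>
    intro f hf
    exact ih _ (by simp [stepF, hf])

theorem FRow_zero (ssum : List Int) (cs : List Int) : FRow ssum cs 0 = true := by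
  exact FRow_zero_aux ssum cs _ (by simp)

theorem preset_getD (size k : Nat) (hk : k < size) :
    ((List.replicate size false).set 0 true).getD k false = decide (k = 0) := by
  rw [getD_set_eq]
  by_cases h : k = 0
  · rw [if_pos ⟨h, by simp only [List.length_replicate]; omega⟩]
    simp [h]
  · rw [if_neg (by tauto)]
    simp [h, List.getD, hk]

-- A's row-lookup lambda, as a function of the table before row i is processed
def AFun (dp : List (List Bool)) (i : Nat) : Nat → Bool :=
  fun p => if i = 0 then decide (p = 0) else (dp.getD (i - 1) []).getD p false

-- A's inner loop body over j
def innerBody (ssum cnt : List Int) (i : Nat) (dp : List (List Bool)) (j : Nat) : List (List Bool) :=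
  if decide (0 < i) && (dp.getD (i - 1) []).getD j false then
    dp.set i ((dp.getD i []).set j true)
  else if subsetChain (fun p => if i = 0 then decide (p = 0) else (dp.getD (i - 1) []).getD p false)
            ssum (cnt.getD i 0) j j then
    dp.set i ((dp.getD i []).set j true)
  else dp

theorem inner_fold (ssum cnt : List Int) (size n i : Nat) (dp : List (List Bool))
    (H1 : dp.length = n) (H2 : i < n)
    (H3 : dp.getD i [] = (List.replicate size false).set 0 true)
    (H4 : AFun dp i 0 = true) :
    ∀ k, k ≤ size →
      ((List.range k).foldl (innerBody ssum cnt i) dp).length = n ∧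
      (∀ t, t ≠ i → ((List.range k).foldl (innerBody ssum cnt i) dp).getD t []
          = dp.getD t []) ∧
      (((List.range k).foldl (innerBody ssum cnt i) dp).getD i []).length = size ∧
      ∀ j', (((List.range k).foldl (innerBody ssum cnt i) dp).getD i []).getD j' false
        = if j' < k then AFun dp i j' || subsetChain (AFun dp i) ssum (cnt.getD i 0) j' j'
          else ((List.replicate size false).set 0 true).getD j' false := by
  intro k
  induction k with
  | zero =>
    intro _
    simp only [List.range_zero, List.foldl_nil]
    refine ⟨H1, ?_, ?_, ?_⟩
    · intro t _
      trivial
    · rw [H3, List.length_set, List.length_replicate]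
    · intro j'
      rw [if_neg (by omega), H3]
  | succ k ih =>
    intro hk
    obtain ⟨ih1, ih2, ih3, ih4⟩ := ih (by omega)
    rw [List.range_succ, List.foldl_append, List.foldl_cons, List.foldl_nil]
    set res := (List.range k).foldl (innerBody ssum cnt i) dp with hres
    have hAF : (fun p => if i = 0 then decide (p = 0) else (res.getD (i - 1) []).getD p false)
        = AFun dp i := by
      funext p
      by_cases hi0 : i = 0
      · simp [AFun, hi0]
      · simp only [AFun, hi0, if_false]
        rw [ih2 (i - 1) (by omega)]
    have hcond1 : (decide (0 < i) && (res.getD (i - 1) []).getD k false) = AFun dp i k ∨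
        ((decide (0 < i) && (res.getD (i - 1) []).getD k false) = false ∧ i = 0) := by
      by_cases hi0 : i = 0
      · right
        exact ⟨by simp [hi0], hi0⟩
      · left
        rw [ih2 (i - 1) (by omega)]
        simp [AFun, hi0, Nat.pos_of_ne_zero hi0]
    have hilen : i < res.length := by omega
    have hrowlen : k < (res.getD i []).length := by omega
    have hset : ∀ j', ((res.set i ((res.getD i []).set k true)).getD i []).getD j' false
        = if j' = k then true else (res.getD i []).getD j' false := by
      intro j'
      rw [getD_set_eq, if_pos ⟨rfl, hilen⟩, getD_set_eq]
      by_cases hj : j' = k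
      · rw [if_pos ⟨hj, hrowlen⟩, if_pos hj]
      · rw [if_neg (by tauto), if_neg hj]
    have hsetlen : ((res.set i ((res.getD i []).set k true)).getD i []).length = size := by
      rw [getD_set_eq, if_pos ⟨rfl, hilen⟩, List.length_set, ih3]
    have hothers : ∀ t, t ≠ i → ((res.set i ((res.getD i []).set k true)).getD t []) = dp.getD t [] := by
      intro t ht
      rw [getD_set_eq, if_neg (by tauto), ih2 t ht]
    have hlen' : (res.set i ((res.getD i []).set k true)).length = n := by
      rw [List.length_set, ih1]
    by_cases hc1 : (decide (0 < i) && (res.getD (i - 1) []).getD k false) = true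
    · have hAFk : AFun dp i k = true := by
        rcases hcond1 with h | ⟨h, _⟩
        · rw [← h, hc1]
        · rw [h] at hc1; exact absurd hc1 (by simp)
      simp only [innerBody]
      rw [if_pos hc1]
      refine ⟨hlen', hothers, hsetlen, ?_⟩
      intro j'
      rw [hset j']
      by_cases hj : j' = k
      · rw [if_pos hj, if_pos (by omega), hj, hAFk, Bool.true_or]
      · rw [if_neg hj, ih4 j']
        by_cases hlt : j' < k
        · rw [if_pos hlt, if_pos (by omega)]
        · rw [if_neg hlt, if_neg (by omega)]
    · simp only [innerBody]
      rw [if_neg hc1, hAF]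
      by_cases hc2 : subsetChain (AFun dp i) ssum (cnt.getD i 0) k k = true
      · rw [if_pos hc2]
        refine ⟨hlen', hothers, hsetlen, ?_⟩
        intro j'
        rw [hset j']
        by_cases hj : j' = k
        · rw [if_pos hj, if_pos (by omega), hj, hc2, Bool.or_true]
        · rw [if_neg hj, ih4 j']
          by_cases hlt : j' < k
          · rw [if_pos hlt, if_pos (by omega)]
          · rw [if_neg hlt, if_neg (by omega)]
      · rw [if_neg hc2]
        refine ⟨ih1, ih2, ih3, ?_⟩
        intro j'
        rw [ih4 j']
        by_cases hj : j' = k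
        · rw [if_neg (by omega), if_pos (by omega), hj, preset_getD size k (by omega)]
          have hc2' : subsetChain (AFun dp i) ssum (cnt.getD i 0) k k = false := by
            revert hc2
            cases subsetChain (AFun dp i) ssum (cnt.getD i 0) k k <;> simp
          rw [hc2', Bool.or_false]
          by_cases hi0 : i = 0
          · subst hi0
            simp [AFun]
          · have hAFk : AFun dp i k = false := by
              rcases hcond1 with h | ⟨_, h⟩
              · rw [← h]
                revert hc1
                cases (decide (0 < i) && (res.getD (i - 1) []).getD k false) <;> simp
              · exact absurd h hi0
            have hk0 : k ≠ 0 := by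
              intro h
              rw [h, H4] at hAFk
              exact absurd hAFk (by simp)
            rw [hAFk]
            simp [hk0]
        · by_cases hlt : j' < k
          · rw [if_pos hlt, if_pos (by omega)]
          · rw [if_neg hlt, if_neg (by omega)]

theorem preset_fold (k : Nat) (dp : List (List Bool)) :
    ((List.range k).foldl (fun dp i => dp.set i ((dp.getD i []).set 0 true)) dp).length = dp.length ∧
    ∀ t, ((List.range k).foldl (fun dp i => dp.set i ((dp.getD i []).set 0 true)) dp).getD t []
      = if t < k ∧ t < dp.length then (dp.getD t []).set 0 true else dp.getD t [] := by
  induction k with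
  | zero =>
    refine ⟨rfl, ?_⟩
    intro t
    rw [if_neg (by omega)]
    simp
  | succ k ih =>
    obtain ⟨ih1, ih2⟩ := ih
    rw [List.range_succ, List.foldl_append, List.foldl_cons, List.foldl_nil]
    set res := (List.range k).foldl (fun dp i => dp.set i ((dp.getD i []).set 0 true)) dp with hres
    have hkk : res.getD k [] = dp.getD k [] := by
      rw [ih2 k, if_neg (by omega)]
    constructor
    · rw [List.length_set, ih1]
    · intro t
      rw [getD_set_eq, ih1, hkk]
      by_cases ht : t = k
      · subst ht
        by_cases hl : t < dp.length
        · rw [if_pos ⟨rfl, hl⟩, if_pos ⟨by omega, hl⟩]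
        · rw [if_neg (by tauto), if_neg (by tauto), ih2 t, if_neg (by tauto)]
      · rw [if_neg (by tauto), ih2 t]
        by_cases hc : t < k ∧ t < dp.length
        · rw [if_pos hc, if_pos ⟨by omega, hc.2⟩]
        · rw [if_neg hc, if_neg (by omega)]

theorem outer_fold (ssum cnt : List Int) (size : Nat) (hsz : 0 < size) :
    ∀ i, i ≤ cnt.length →
      (((List.range i).foldl (fun dp i => (List.range size).foldl (innerBody ssum cnt i) dp)
          ((List.range cnt.length).foldl (fun dp i => dp.set i ((dp.getD i []).set 0 true))
            (List.replicate cnt.length (List.replicate size false)))).length = cnt.length) ∧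
      (∀ t, i ≤ t → t < cnt.length →
        ((List.range i).foldl (fun dp i => (List.range size).foldl (innerBody ssum cnt i) dp)
          ((List.range cnt.length).foldl (fun dp i => dp.set i ((dp.getD i []).set 0 true))
            (List.replicate cnt.length (List.replicate size false)))).getD t []
          = (List.replicate size false).set 0 true) ∧
      (∀ t, t < i →
        (((List.range i).foldl (fun dp i => (List.range size).foldl (innerBody ssum cnt i) dp)
          ((List.range cnt.length).foldl (fun dp i => dp.set i ((dp.getD i []).set 0 true))
            (List.replicate cnt.length (List.replicate size false)))).getD t []).length = size ∧
        ∀ j', j' < size →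
          (((List.range i).foldl (fun dp i => (List.range size).foldl (innerBody ssum cnt i) dp)
            ((List.range cnt.length).foldl (fun dp i => dp.set i ((dp.getD i []).set 0 true))
              (List.replicate cnt.length (List.replicate size false)))).getD t []).getD j' false
            = FRow ssum (cnt.take (t + 1)) j') := by
  set dp0 := (List.range cnt.length).foldl (fun dp i => dp.set i ((dp.getD i []).set 0 true))
      (List.replicate cnt.length (List.replicate size false)) with hdp0
  have hp := preset_fold cnt.length (List.replicate cnt.length (List.replicate size false))
  have hdp0len : dp0.length = cnt.length := by rw [hdp0, hp.1, List.length_replicate]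
  have hdp0row : ∀ t, t < cnt.length → dp0.getD t [] = (List.replicate size false).set 0 true := by
    intro t ht
    rw [hdp0, hp.2 t, if_pos ⟨ht, by simpa using ht⟩,
      List.getD_eq_getElem _ [] (by simpa using ht), List.getElem_replicate]
  intro i
  induction i with
  | zero =>
    intro _
    refine ⟨hdp0len, ?_, ?_⟩
    · intro t _ ht
      simpa using hdp0row t ht
    · intro t ht
      omega
  | succ i ih =>
    intro hi
    obtain ⟨ih1, ih2, ih3⟩ := ih (by omega)
    rw [List.range_succ, List.foldl_append, List.foldl_cons, List.foldl_nil]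
    set res := (List.range i).foldl (fun dp i => (List.range size).foldl (innerBody ssum cnt i) dp) dp0 with hres
    have hrowi : res.getD i [] = (List.replicate size false).set 0 true := ih2 i (le_refl i) (by omega)
    have hAFeq : ∀ p, p < size → AFun res i p = FRow ssum (cnt.take i) p := by
      intro p hp'
      by_cases hi0 : i = 0
      · subst hi0
        simp [AFun, FRow]
      · simp only [AFun, hi0, if_false]
        rw [(ih3 (i - 1) (by omega)).2 p hp']
        congr 2
        omega
    have hAF0 : AFun res i 0 = true := by
      rw [hAFeq 0 hsz, FRow_zero]
    obtain ⟨f1, f2, f3, f4⟩ := inner_fold ssum cnt size cnt.length i res ih1 (by omega) hrowi hAF0 size (le_refl size)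
    refine ⟨f1, ?_, ?_⟩
    · intro t ht1 ht2
      rw [f2 t (by omega)]
      exact ih2 t (by omega) ht2
    · intro t ht
      by_cases hti : t = i
      · subst hti
        refine ⟨f3, ?_⟩
        intro j' hj'
        rw [f4 j', if_pos hj']
        have hchain : subsetChain (AFun res t) ssum (cnt.getD t 0) j' j'
            = subsetChain (FRow ssum (cnt.take t)) ssum (cnt.getD t 0) j' j' :=
          chain_congr _ _ _ _ _ (fun p hp' => hAFeq p (by omega)) j'
        rw [hAFeq j' hj', hchain]
        have htake : cnt.take (t + 1) = cnt.take t ++ [cnt.getD t 0] := by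
          rw [List.take_add_one]
          congr 1
          rw [List.getElem?_eq_getElem (by omega), List.getD_eq_getElem _ _ (by omega)]
          rfl
        rw [htake]
        conv_rhs => rw [FRow, List.foldl_append, List.foldl_cons, List.foldl_nil]
        rfl
      · obtain ⟨g1, g2⟩ := ih3 t (by omega)
        refine ⟨by rw [f2 t hti]; exact g1, ?_⟩
        intro j' hj'
        rw [f2 t hti]
        exact g2 j' hj'

theorem A_dp_eq (ssum : List Int) (cnt : List Int) (size : Nat) (hsz : 0 < size) (hn : cnt ≠ []) :
    ((((List.range cnt.length).foldl (fun dp i =>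
        (List.range size).foldl (innerBody ssum cnt i) dp)
        ((List.range cnt.length).foldl (fun dp i => dp.set i ((dp.getD i []).set 0 true))
          (List.replicate cnt.length (List.replicate size false))))).getD (cnt.length - 1) []).getD (size - 1) false
      = FRow ssum cnt (size - 1) := by
  obtain ⟨c1, c2, c3⟩ := outer_fold ssum cnt size hsz cnt.length (le_refl _)
  have hn0 : 0 < cnt.length := List.length_pos_iff.mpr hn
  obtain ⟨r1, r2⟩ := c3 (cnt.length - 1) (by omega)
  rw [r2 (size - 1) (by omega)]
  congr 2
  rw [show cnt.length - 1 + 1 = cnt.length from by omega, List.take_length]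

theorem cntA_eq (nums : List Int) :
    (PySem.Dict.counter nums).items.foldl (fun acc kv => acc ++ [kv.2]) []
      = (PySem.Dict.counter nums).values := by
  simpa using PySem.List.foldl_append_singleton_eq_map (fun kv : Int × Int => kv.2)
    (PySem.Dict.counter nums).items []

theorem cnt_ne_nil (nums : List Int) (h : nums ≠ []) : (PySem.Dict.counter nums).values ≠ [] := by
  have hk : (PySem.Dict.counter nums).keys = PySem.Set.ofList nums := PySem.Dict.keys_counter nums
  cases nums with
  | nil => exact absurd rfl h
  | cons x xs =>
    intro hv
    have hit : (PySem.Dict.counter (x :: xs)).items = [] := by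
      have := congrArg List.length hv
      simpa [PySem.Dict.values] using this
    have hk0 : (PySem.Dict.counter (x :: xs)).keys = [] := by
      simp [PySem.Dict.keys, hit]
    rw [hk] at hk0
    have hx : x ∈ PySem.Set.ofList (x :: xs) := by
      rw [PySem.Set.mem_ofList]
      simp
    rw [hk0] at hx
    simp at hx

-- ===== B-side: the threaded memo cache is correct =====

-- a cache is valid when every stored entry (i, mask) with i ≤ cnt.length holds FRow (take i) mask
def ValidMemo (ssum cnt : List Int) (memo : PySem.Dict (Nat × Nat) Bool) : Prop :=
  ∀ i mask b, i ≤ cnt.length → memo.get? (i, mask) = some b → b = FRow ssum (cnt.take i) mask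

theorem FRow_take_succ (ssum cnt : List Int) (i : Nat) (h0 : i ≠ 0) (hle : i ≤ cnt.length) :
    FRow ssum (cnt.take i) = stepF ssum (FRow ssum (cnt.take (i - 1))) (cnt.getD (i - 1) 0) := by
  have htake : cnt.take i = cnt.take (i - 1) ++ [cnt.getD (i - 1) 0] := by
    rw [show i = (i - 1) + 1 from by omega, List.take_add_one]
    congr 1
    rw [List.getElem?_eq_getElem (by omega), List.getD_eq_getElem _ _ (by omega)]
    rfl
  rw [htake, FRow, List.foldl_append, List.foldl_cons, List.foldl_nil]
  rfl

theorem dfsAltB_correct (ssum cnt : List Int) :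
    ∀ i, (∀ mask memo, i ≤ cnt.length → ValidMemo ssum cnt memo →
        (dfsAltB ssum cnt i mask memo).1 = FRow ssum (cnt.take i) mask ∧
        ValidMemo ssum cnt (dfsAltB ssum cnt i mask memo).2) := by
  intro i
  induction i with
  | zero =>
    intro mask memo _ hv
    rw [dfsAltB]
    by_cases hm : mask = 0
    · simp only [hm]
      exact ⟨by simp [FRow], hv⟩
    · simp only [hm]
      exact ⟨by simp [FRow, hm], hv⟩
  | succ i ih =>
    -- inner loop lemma at level i+1, by strong induction on s
    have hloop : ∀ s mask memo, i + 1 ≤ cnt.length → ValidMemo ssum cnt memo →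
        (loopAltB ssum cnt (i + 1) mask s memo).1
          = subsetChain (FRow ssum (cnt.take i)) ssum (cnt.getD i 0) mask s ∧
        ValidMemo ssum cnt (loopAltB ssum cnt (i + 1) mask s memo).2 := by
      intro s
      induction s using Nat.strong_induction_on with
      | _ s ihs =>
        intro mask memo hle hv
        rw [loopAltB]
        have hsc : subsetChain (FRow ssum (cnt.take i)) ssum (cnt.getD i 0) mask s
            = if s = 0 then false
              else if FRow ssum (cnt.take i) (mask - s) && decide (ssum.getD s 0 ≤ cnt.getD i 0) then true
              else subsetChain (FRow ssum (cnt.take i)) ssum (cnt.getD i 0) mask ((s - 1) &&& mask) := by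
          conv_lhs => rw [subsetChain]
          by_cases hs : s = 0
          · simp [hs]
          · simp [hs]
        rw [hsc]
        by_cases hs : s = 0
        · rw [dif_pos hs, if_pos hs]
          exact ⟨rfl, hv⟩
        · rw [dif_neg hs, if_neg hs]
          simp only [Nat.add_sub_cancel]
          have hrec := ihs ((s - 1) &&& mask)
            (Nat.lt_of_le_of_lt Nat.and_le_left (Nat.sub_lt (Nat.pos_of_ne_zero hs) Nat.one_pos))
          by_cases hneed : ssum.getD s 0 ≤ cnt.getD i 0
          · rw [if_pos (decide_eq_true hneed)]
            obtain ⟨hd1, hd2⟩ := ih (mask - s) memo (by omega) hv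
            rw [hd1, decide_eq_true hneed, Bool.and_true]
            by_cases hF : FRow ssum (cnt.take i) (mask - s) = true
            · rw [if_pos hF, if_pos hF]
              exact ⟨rfl, by rw [← hF]; exact hd2⟩
            · have hFf : FRow ssum (cnt.take i) (mask - s) = false := by
                revert hF; cases FRow ssum (cnt.take i) (mask - s) <;> simp
              rw [if_neg hF, if_neg hF]
              exact hrec mask (dfsAltB ssum cnt i (mask - s) memo).2 hle hd2
          · rw [if_neg (by simpa using hneed)]
            have : (decide (ssum.getD s 0 ≤ cnt.getD i 0)) = false := by simpa using hneed
            rw [this, Bool.and_false, if_neg (by simp : ¬ (false = true))]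
            exact hrec mask memo hle hv
    intro mask memo hle hv
    rw [dfsAltB]
    by_cases hm : mask = 0
    · simp only [hm]
      exact ⟨(FRow_zero ssum (cnt.take (i + 1))).symm, hv⟩
    · rw [if_neg hm, dif_neg (Nat.succ_ne_zero i)]
      simp only [Nat.add_sub_cancel]
      cases hget : memo.get? (i + 1, mask) with
      | some v =>
        exact ⟨hv (i + 1) mask v hle hget, hv⟩
      | none =>
        simp only []
        obtain ⟨hd1, hd2⟩ := ih mask memo (by omega) hv
        have hstep : FRow ssum (cnt.take (i + 1)) mask
            = (FRow ssum (cnt.take i) mask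
               || subsetChain (FRow ssum (cnt.take i)) ssum (cnt.getD i 0) mask mask) := by
          rw [FRow_take_succ ssum cnt (i + 1) (Nat.succ_ne_zero i) hle]
          rfl
        -- q is the pair (res, memo) before the insertion
        have hq : ∀ q : Bool × PySem.Dict (Nat × Nat) Bool,
            q = (if (dfsAltB ssum cnt i mask memo).1 then dfsAltB ssum cnt i mask memo
                 else loopAltB ssum cnt (i + 1) mask mask (dfsAltB ssum cnt i mask memo).2) →
            q.1 = FRow ssum (cnt.take (i + 1)) mask ∧ ValidMemo ssum cnt q.2 := by
          intro q hqdef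
          by_cases hr : (dfsAltB ssum cnt i mask memo).1 = true
          · rw [hqdef, if_pos hr]
            refine ⟨?_, hd2⟩
            rw [hd1] at hr ⊢
            rw [hstep, hr]
            simp
          · have hrf : (dfsAltB ssum cnt i mask memo).1 = false := by
              revert hr; cases (dfsAltB ssum cnt i mask memo).1 <;> simp
            rw [hqdef, if_neg (by simp [hrf])]
            obtain ⟨hl1, hl2⟩ := hloop mask mask (dfsAltB ssum cnt i mask memo).2 hle hd2
            refine ⟨?_, hl2⟩
            rw [hl1, hstep]
            rw [hd1] at hrf
            rw [hrf]
            simp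
        obtain ⟨hq1, hq2⟩ := hq _ rfl
        refine ⟨hq1, ?_⟩
        intro i' mask' b' hle' hget'
        rw [PySem.Dict.get?_insert] at hget'
        by_cases hk : (i', mask') = (i + 1, mask)
        · rw [if_pos hk] at hget'
          have hi' : i' = i + 1 := congrArg Prod.fst hk
          have hm' : mask' = mask := congrArg Prod.snd hk
          cases hget'
          rw [hi', hm', ← hq1]
        · rw [if_neg hk] at hget'
          exact hq2 i' mask' b' hle' hget'

theorem final_spec (nums quantity : List Int) (h : nums ≠ []) :
    canDistribute nums quantity = canDistribute_alt nums quantity := by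
  have hsz : 0 < 1 <<< quantity.length := by
    rw [Nat.one_shiftLeft]
    positivity
  rw [canDistribute, canDistribute_alt]
  rw [cntA_eq, ssumA_eq]
  set cnt := (PySem.Dict.counter nums).values with hcnt
  set ssum := (List.range (1 <<< quantity.length)).map (ssumOf quantity) with hssum
  have hvempty : ValidMemo ssum cnt PySem.Dict.empty := by
    intro i mask b _ hget
    rw [PySem.Dict.get?_empty] at hget
    exact absurd hget (by simp)
  obtain ⟨hd1, _⟩ := dfsAltB_correct ssum cnt cnt.length ((1 <<< quantity.length) - 1)
    PySem.Dict.empty (le_refl _) hvempty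
  rw [hd1, List.take_length]
  exact A_dp_eq ssum cnt (1 <<< quantity.length) hsz (cnt_ne_nil nums h)

-- ===== VERDICT (by name: the statement is the Claim_ definition above) =====
theorem canDistribute_spec : Claim_equal_canDistribute := by
  intro nums quantity _ hpre
  unfold Spec_canDistribute
  exact final_spec nums quantity hpre

theorem canDistribute_raises : Claim_raises_canDistribute := by
  unfold Claim_raises_canDistribute
  refine ⟨?_, by decide, by decide, ?_⟩
  · intro nums quantity _ hr
    rw [Raises_canDistribute] at hr
    rw [Pre_canDistribute, hr]
    simp
  · show canDistribute_alt [] [] = true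
    rw [canDistribute_alt]
    rw [dfsAltB]
    simp

-- self-check (cites the verdict above): at the crash witness the region holds and B's port returns the stated value
theorem pvRaiseWitness_ok :
    Raises_canDistribute (pvRaiseWitness_canDistribute.1) (pvRaiseWitness_canDistribute.2) ∧
    canDistribute_alt (pvRaiseWitness_canDistribute.1) (pvRaiseWitness_canDistribute.2) = pvRaiseWitnessOut_canDistribute :=
  ⟨canDistribute_raises.2.2.1, canDistribute_raises.2.2.2⟩
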